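-- pv_equiv track=rewrite | github.com/jennharw/Algorithm | test1.py | include3inclock
-- ===== SOURCE A (Python) =====
-- def include3inclock(n):
--     #00시 00분 00초 ~ N시 00분 00초
--
--     result = 0
--     #완전탐색
--
--     for i in range(n+1) :
--         for j in range(60):
--             for k in range(60):
--                 if '3' in str(i) + str(j) + str(k):
--                     result += 1
--
--     return result
-- ===== SOURCE B (Python) =====
-- def include3inclock(n):
--     # 1575 = 3600 - 45*45: minute-second pairs whose digits contain '3'
--     # (45 of the 60 values 0..59 are '3'-free). Per hour: 3600 if the hour
--     # itself shows a '3', else 1575.  Drops the inner 60x60 scan.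
--     total = 0
--     for i in range(n + 1):
--         total += 3600 if '3' in str(i) else 1575
--     return total
-- ===== Notes on version B (the rewrite author's own statement) =====
-- stated objective: faster
-- what changed: B replaces the inner 60x60 minute-second scan per hour by the precomputed constant 1575 (= 3600 - 45*45 pairs containing a '3'), adding 3600 for hours whose own digits contain '3'.
import Mathlib
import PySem

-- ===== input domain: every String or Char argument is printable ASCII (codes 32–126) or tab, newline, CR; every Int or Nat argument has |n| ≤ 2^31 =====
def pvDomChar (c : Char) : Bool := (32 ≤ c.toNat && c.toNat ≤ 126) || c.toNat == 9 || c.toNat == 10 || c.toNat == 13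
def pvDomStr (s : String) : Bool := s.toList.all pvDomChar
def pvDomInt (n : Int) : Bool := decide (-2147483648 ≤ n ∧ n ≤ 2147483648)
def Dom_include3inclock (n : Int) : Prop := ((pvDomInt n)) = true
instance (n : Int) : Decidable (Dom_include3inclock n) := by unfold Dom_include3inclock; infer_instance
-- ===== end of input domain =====

-- B drops A's inner 60x60 minute-second scan: per hour it adds the precomputed
-- constant 1575 (minute-second pairs whose digits contain '3'), or 3600 when the
-- hour's own digits contain '3' (objective: faster by a constant factor).

-- ===== PORT A =====
-- triple loop: for i in range(n+1): for j in range(60): for k in range(60):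
--   if '3' in str(i)+str(j)+str(k): result += 1
def include3inclock (n : Int) : Int :=
  (PySem.List.pyRange 0 (n + 1) 1).foldl (fun result i =>
    (PySem.List.pyRange 0 60 1).foldl (fun result j =>
      (PySem.List.pyRange 0 60 1).foldl (fun result k =>
        if PySem.Chars.isIn ['3']
            (PySem.Int.toChars i ++ PySem.Int.toChars j ++ PySem.Int.toChars k)
        then result + 1 else result) result) result) 0

-- ===== PORT B =====
-- single loop: total += 3600 if '3' in str(i) else 1575
def include3inclock_alt (n : Int) : Int :=
  (PySem.List.pyRange 0 (n + 1) 1).foldl (fun total i =>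
    total + (if PySem.Chars.isIn ['3'] (PySem.Int.toChars i) then 3600 else 1575)) 0

-- ===== PRECONDITION & SPEC =====
def Spec_include3inclock (n : Int) (out : Int) : Prop := out = include3inclock_alt n
instance (n : Int) (out : Int) : Decidable (Spec_include3inclock n out) := by unfold Spec_include3inclock; infer_instance

-- ===== CLAIM (what is proved, stated in full; the proofs are below) =====
def Claim_equal_include3inclock : Prop := ∀ (n : Int), Dom_include3inclock n → Spec_include3inclock n (include3inclock n)

-- ===== LEMMAS AND PROOFS =====

-- pointwise-equal step functions give equal folds
theorem pv_foldl_ext {α β : Type} (f g : α → β → α) (l : List β) (a : α)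
    (h : ∀ r x, x ∈ l → f r x = g r x) : l.foldl f a = l.foldl g a := by
  induction l generalizing a with
  | nil => rfl
  | cons x t ih =>
    simp only [List.foldl_cons, h a x (List.mem_cons_self)]
    exact ih _ (fun r y hy => h r y (List.mem_cons_of_mem x hy))

-- a single-character substring test is membership
theorem pv_isIn_singleton (c : Char) (s : List Char) :
    PySem.Chars.isIn [c] s = true ↔ c ∈ s :=
  (PySem.Chars.isIn_iff_infix _ _).trans (List.singleton_infix_iff c s)

-- '3' in (xs ++ ys)  =  '3' in xs  or  '3' in ys
theorem pv_isIn_singleton_append (c : Char) (xs ys : List Char) :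
    PySem.Chars.isIn [c] (xs ++ ys)
      = (PySem.Chars.isIn [c] xs || PySem.Chars.isIn [c] ys) := by
  rw [Bool.eq_iff_iff, Bool.or_eq_true]
  simp only [pv_isIn_singleton, List.mem_append]

-- an accumulate-by-g fold shifts its accumulator
theorem pv_foldl_addmap (g : Int → Int) (l : List Int) (r : Int) :
    l.foldl (fun r x => r + g x) r = r + (l.map g).sum := by
  induction l generalizing r with
  | nil => simp
  | cons x t ih => simp only [List.foldl_cons, List.map_cons, List.sum_cons, ih]; ring

-- A's inner 60x60 double loop, for one hour i, adds exactly B's per-hour constant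
set_option maxRecDepth 200000 in
theorem pv_inner (i r : Int) :
    (PySem.List.pyRange 0 60 1).foldl (fun result j =>
      (PySem.List.pyRange 0 60 1).foldl (fun result k =>
        if PySem.Chars.isIn ['3']
            (PySem.Int.toChars i ++ PySem.Int.toChars j ++ PySem.Int.toChars k)
        then result + 1 else result) result) r
      = r + (if PySem.Chars.isIn ['3'] (PySem.Int.toChars i) then 3600 else 1575) := by
  have hsplit : ∀ j k : Int,
      PySem.Chars.isIn ['3']
          (PySem.Int.toChars i ++ PySem.Int.toChars j ++ PySem.Int.toChars k)
        = (PySem.Chars.isIn ['3'] (PySem.Int.toChars i)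
            || PySem.Chars.isIn ['3'] (PySem.Int.toChars j ++ PySem.Int.toChars k)) := by
    intro j k
    rw [List.append_assoc, pv_isIn_singleton_append]
  by_cases hi : PySem.Chars.isIn ['3'] (PySem.Int.toChars i) = true
  · -- the hour shows a '3': every one of the 3600 iterations counts
    simp only [hsplit, hi, Bool.true_or, if_true]
    calc (PySem.List.pyRange 0 60 1).foldl (fun result _ =>
            (PySem.List.pyRange 0 60 1).foldl (fun result _ => result + 1) result) r
        = (PySem.List.pyRange 0 60 1).foldl (fun result _ => result + (60:Int)) r := by
          apply pv_foldl_ext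
          intro s _ _
          have h := pv_foldl_addmap (fun _ => (1:Int)) (PySem.List.pyRange 0 60 1) s
          rw [h]
          norm_num [show (((PySem.List.pyRange 0 60 1).map (fun _ => (1:Int))).sum = 60) from by decide]
      _ = r + 3600 := by
          rw [pv_foldl_addmap (fun _ => (60:Int))]
          norm_num [show (((PySem.List.pyRange 0 60 1).map (fun _ => (60:Int))).sum = 3600) from by decide]
  · -- '3'-free hour: the count no longer depends on i; it is the constant 1575
    rw [Bool.not_eq_true] at hi
    simp only [hsplit, hi, Bool.false_or, if_neg (by simp : ¬ (false = true))]
    calc (PySem.List.pyRange 0 60 1).foldl (fun result j =>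
          (PySem.List.pyRange 0 60 1).foldl (fun result k =>
            if PySem.Chars.isIn ['3'] (PySem.Int.toChars j ++ PySem.Int.toChars k)
            then result + 1 else result) result) r
        = (PySem.List.pyRange 0 60 1).foldl (fun result j =>
            result + ((PySem.List.pyRange 0 60 1).map (fun k =>
              if PySem.Chars.isIn ['3'] (PySem.Int.toChars j ++ PySem.Int.toChars k)
              then (1:Int) else 0)).sum) r := by
          apply pv_foldl_ext
          intro s j _
          have h := pv_foldl_addmap (fun k =>
            if PySem.Chars.isIn ['3'] (PySem.Int.toChars j ++ PySem.Int.toChars k)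
            then (1:Int) else 0) (PySem.List.pyRange 0 60 1) s
          rw [← h]
          apply pv_foldl_ext
          intro t k _
          by_cases hc : PySem.Chars.isIn ['3'] (PySem.Int.toChars j ++ PySem.Int.toChars k) = true
          · simp [hc]
          · simp [hc]
      _ = r + ((PySem.List.pyRange 0 60 1).map (fun j =>
              ((PySem.List.pyRange 0 60 1).map (fun k =>
                if PySem.Chars.isIn ['3'] (PySem.Int.toChars j ++ PySem.Int.toChars k)
                then (1:Int) else 0)).sum)).sum := pv_foldl_addmap _ _ r
      _ = r + 1575 := by
          rw [show ((PySem.List.pyRange 0 60 1).map (fun j =>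
              ((PySem.List.pyRange 0 60 1).map (fun k =>
                if PySem.Chars.isIn ['3'] (PySem.Int.toChars j ++ PySem.Int.toChars k)
                then (1:Int) else 0)).sum)).sum = 1575 from by decide]

-- ===== VERDICT (by name: the statement is the Claim_ definition above) =====
theorem include3inclock_spec : Claim_equal_include3inclock := by
  intro n _
  unfold Spec_include3inclock include3inclock include3inclock_alt
  apply pv_foldl_ext
  intro result i _
  exact pv_inner i result
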